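-- pv_equiv track=rewrite | github.com/paiml/depyler | examples/hard_realworld_state_machine.py | run_protocol
-- ===== SOURCE A (Python) =====
-- def transition(current: int, event: int) -> int:
--     """Apply a transition event to current state.
--     Events: 0=open, 1=syn, 2=ack, 3=fin, 4=close, 5=timeout."""
--     if current == 0:
--         if event == 0:
--             return 1
--         if event == 1:
--             return 2
--     elif current == 1:
--         if event == 1:
--             return 3
--     elif current == 2:
--         if event == 2:
--             return 4
--         if event == 1:
--             return 3
--     elif current == 3:
--         if event == 2:
--             return 4
--     elif current == 4:
--         if event == 3:
--             return 5
--         if event == 4: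
--             return 7
--     elif current == 5:
--         if event == 2:
--             return 6
--         if event == 3:
--             return 9
--     elif current == 6:
--         if event == 3:
--             return 9
--     elif current == 7:
--         if event == 4:
--             return 8
--     elif current == 8:
--         if event == 2:
--             return 0
--     elif current == 9:
--         if event == 5:
--             return 0
--     return current
--
-- def run_protocol(events: list[int]) -> list[int]:
--     """Run a sequence of events, returning state history."""
--     state: int = 0
--     history: list[int] = [state]
--     idx: int = 0
--     while idx < len(events):
--         state = transition(state, events[idx])
--         history.append(state)
--         idx = idx + 1
--     return history
-- ===== SOURCE B (Python) =====
-- # Transition-monoid FSM run: each event is a whole-state-space map (length-10 list);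
-- # prefix compositions of these maps are accumulated and the history is read off by
-- # evaluating every composed map at the initial state 0.
-- IDENT = [0, 1, 2, 3, 4, 5, 6, 7, 8, 9]
-- EVENT_ROWS = [
--     [1, 1, 2, 3, 4, 5, 6, 7, 8, 9],  # event 0: open
--     [2, 3, 3, 3, 4, 5, 6, 7, 8, 9],  # event 1: syn
--     [0, 1, 4, 4, 4, 6, 6, 7, 0, 9],  # event 2: ack
--     [0, 1, 2, 3, 5, 9, 9, 7, 8, 9],  # event 3: fin
--     [0, 1, 2, 3, 7, 5, 6, 8, 8, 9],  # event 4: close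
--     [0, 1, 2, 3, 4, 5, 6, 7, 8, 0],  # event 5: timeout
-- ]
--
-- def run_protocol(events):
--     maps = [IDENT]
--     for e in events:
--         f = EVENT_ROWS[e] if 0 <= e < 6 else IDENT
--         maps.append([f[s] for s in maps[-1]])
--     return [m[0] for m in maps]
-- ===== Notes on version B (the rewrite author's own statement) =====
-- stated objective: alternative
-- what changed: B runs the FSM in its transition-monoid representation: each event is a whole-state-space map (a length-10 list), the loop accumulates prefix compositions of those maps, and the history is read off in a second pass by evaluating every composed map at the initial state 0 -- no per-step branching on the current state.
import Mathlib
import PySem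

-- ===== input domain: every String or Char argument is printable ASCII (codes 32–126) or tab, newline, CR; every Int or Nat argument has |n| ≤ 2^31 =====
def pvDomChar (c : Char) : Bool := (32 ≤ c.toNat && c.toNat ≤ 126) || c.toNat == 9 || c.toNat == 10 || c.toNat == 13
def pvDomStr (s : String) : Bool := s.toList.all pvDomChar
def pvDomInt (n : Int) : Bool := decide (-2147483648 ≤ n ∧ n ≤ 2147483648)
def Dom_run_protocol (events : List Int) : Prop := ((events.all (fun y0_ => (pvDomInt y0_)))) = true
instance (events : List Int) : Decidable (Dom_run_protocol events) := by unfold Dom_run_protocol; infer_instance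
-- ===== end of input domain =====

-- B runs the FSM in its transition-monoid form: prefix compositions of per-event
-- whole-state-space maps, with the history read off by evaluating each map at 0.

-- ===== PORT A =====
def transition (current : Int) (event : Int) : Int :=
  if current = 0 then
    (if event = 0 then 1 else if event = 1 then 2 else current)
  else if current = 1 then
    (if event = 1 then 3 else current)
  else if current = 2 then
    (if event = 2 then 4 else if event = 1 then 3 else current)
  else if current = 3 then
    (if event = 2 then 4 else current)
  else if current = 4 then
    (if event = 3 then 5 else if event = 4 then 7 else current)
  else if current = 5 then
    (if event = 2 then 6 else if event = 3 then 9 else current)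
  else if current = 6 then
    (if event = 3 then 9 else current)
  else if current = 7 then
    (if event = 4 then 8 else current)
  else if current = 8 then
    (if event = 2 then 0 else current)
  else if current = 9 then
    (if event = 5 then 0 else current)
  else current

-- the `while idx < len(events)` loop of A, state = (state, history, idx)
def runLoopA (events : List Int) (state : Int) (history : List Int) (idx : Nat) : List Int :=
  if h : idx < events.length then
    let s := transition state events[idx]
    runLoopA events s (history ++ [s]) (idx + 1)
  else history
termination_by events.length - idx

def run_protocol (events : List Int) : List Int :=
  runLoopA events 0 [0] 0

-- ===== PORT B =====
-- IDENT and EVENT_ROWS of Source B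
def pvIdent : List Int := [0, 1, 2, 3, 4, 5, 6, 7, 8, 9]

def pvEventRows : List (List Int) :=
  [[1, 1, 2, 3, 4, 5, 6, 7, 8, 9],
   [2, 3, 3, 3, 4, 5, 6, 7, 8, 9],
   [0, 1, 4, 4, 4, 6, 6, 7, 0, 9],
   [0, 1, 2, 3, 5, 9, 9, 7, 8, 9],
   [0, 1, 2, 3, 7, 5, 6, 8, 8, 9],
   [0, 1, 2, 3, 4, 5, 6, 7, 8, 0]]

-- Source B's `EVENT_ROWS[e] if 0 <= e < 6 else IDENT` and `[f[s] for s in maps[-1]]`: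
-- the two indexings always hit (the guard bounds e; states stay in 0..9, proved
-- below), so the `.getD` defaults are never taken
def pvCompose (m : List Int) (e : Int) : List Int :=
  let f := if 0 ≤ e ∧ e < 6 then (PySem.List.pyGet? pvEventRows e).getD pvIdent else pvIdent
  m.map (fun s => (PySem.List.pyGet? f s).getD 0)

def run_protocol_alt (events : List Int) : List Int :=
  let maps := events.foldl (fun ms e => ms ++ [pvCompose (ms.getLastD pvIdent) e]) [pvIdent]
  maps.map (fun m => (PySem.List.pyGet? m 0).getD 0)

-- ===== PRECONDITION & SPEC =====
def Spec_run_protocol (events : List Int) (out : List Int) : Prop := out = run_protocol_alt events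
instance (events : List Int) (out : List Int) : Decidable (Spec_run_protocol events out) := by unfold Spec_run_protocol; infer_instance

-- ===== CLAIM =====
def Claim_equal_run_protocol : Prop := ∀ (events : List Int), Dom_run_protocol events → Spec_run_protocol events (run_protocol events)

-- ===== LEMMAS AND PROOFS =====

-- history tail produced by A from state s over the remaining events
def histFrom (s : Int) : List Int → List Int
  | [] => []
  | e :: es => let s' := transition s e; s' :: histFrom s' es

-- maps appended by B's loop starting from composed map m
def mapsFrom (m : List Int) : List Int → List (List Int)
  | [] => []
  | e :: es => let m' := pvCompose m e; m' :: mapsFrom m' es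

-- the table-row lookup agrees with A's if-chain on states 0..9
set_option maxHeartbeats 1600000 in
theorem pvLookup_eq (e s : Int) (h0 : 0 ≤ s) (h9 : s < 10) :
    (PySem.List.pyGet?
        (if 0 ≤ e ∧ e < 6 then (PySem.List.pyGet? pvEventRows e).getD pvIdent else pvIdent)
        s).getD 0 = transition s e := by
  have hs : s = 0 ∨ s = 1 ∨ s = 2 ∨ s = 3 ∨ s = 4 ∨ s = 5 ∨ s = 6 ∨ s = 7 ∨ s = 8 ∨ s = 9 := by
    omega
  by_cases he : 0 ≤ e ∧ e < 6
  · rw [if_pos he]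
    have htbl : ∀ x ∈ ([0, 1, 2, 3, 4, 5] : List Int), ∀ y ∈ pvIdent,
        (PySem.List.pyGet? ((PySem.List.pyGet? pvEventRows x).getD pvIdent) y).getD 0 =
          transition y x := by decide
    have he' : e = 0 ∨ e = 1 ∨ e = 2 ∨ e = 3 ∨ e = 4 ∨ e = 5 := by omega
    refine htbl e ?_ s ?_
    · rcases he' with rfl | rfl | rfl | rfl | rfl | rfl <;> simp
    · rcases hs with rfl | rfl | rfl | rfl | rfl | rfl | rfl | rfl | rfl | rfl <;> simp [pvIdent]
  · rw [if_neg he]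
    have hid : (PySem.List.pyGet? pvIdent s).getD 0 = s := by
      rcases hs with rfl | rfl | rfl | rfl | rfl | rfl | rfl | rfl | rfl | rfl <;> decide
    rw [hid]
    have he0 : e ≠ 0 := by omega
    have he1 : e ≠ 1 := by omega
    have he2 : e ≠ 2 := by omega
    have he3 : e ≠ 3 := by omega
    have he4 : e ≠ 4 := by omega
    have he5 : e ≠ 5 := by omega
    simp only [transition]
    split_ifs <;> omega

set_option maxHeartbeats 1600000 in
theorem transition_range (s e : Int) (h0 : 0 ≤ s) (h9 : s < 10) :
    0 ≤ transition s e ∧ transition s e < 10 := by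
  unfold transition
  split_ifs <;> omega

-- invariant on composed maps: length 10, entries in 0..9
def GoodMap (m : List Int) : Prop := m.length = 10 ∧ ∀ x ∈ m, 0 ≤ x ∧ x < 10

theorem pvCompose_eq (m : List Int) (e : Int) (h : ∀ x ∈ m, 0 ≤ x ∧ x < 10) :
    pvCompose m e = m.map (fun s => transition s e) := by
  unfold pvCompose
  exact List.map_congr_left (fun x hx => pvLookup_eq e x (h x hx).1 (h x hx).2)

theorem goodMap_compose (m : List Int) (e : Int) (h : GoodMap m) : GoodMap (pvCompose m e) := by
  rw [pvCompose_eq m e h.2]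
  refine ⟨by simp [h.1], ?_⟩
  intro x hx
  rcases List.mem_map.1 hx with ⟨s, hs, rfl⟩
  exact transition_range s e (h.2 s hs).1 (h.2 s hs).2

-- evaluating each composed map at 0 yields A's history tail
theorem mapsFrom_eval (es : List Int) : ∀ (a : Int) (t : List Int), GoodMap (a :: t) →
    (mapsFrom (a :: t) es).map (fun m => (PySem.List.pyGet? m 0).getD 0) =
      histFrom a es := by
  induction es with
  | nil => intro a t _; rfl
  | cons e es ih =>
    intro a t hg
    have ha : 0 ≤ a ∧ a < 10 := hg.2 a (by simp)
    have hc : pvCompose (a :: t) e =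
        transition a e :: t.map (fun s => transition s e) := by
      rw [pvCompose_eq _ e hg.2]; simp
    have hg' : GoodMap (pvCompose (a :: t) e) := goodMap_compose _ e hg
    rw [hc] at hg'
    simp only [mapsFrom, hc, List.map_cons, histFrom]
    rw [ih (transition a e) _ hg']
    congr 1
    simp [PySem.List.pyGet?, PySem.List.pyIdx?]

-- B's foldl accumulates exactly `mapsFrom` after the seed
theorem foldlB_eq (es : List Int) : ∀ (ms : List (List Int)) (m : List Int),
    es.foldl (fun ms e => ms ++ [pvCompose (ms.getLastD pvIdent) e]) (ms ++ [m]) =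
      (ms ++ [m]) ++ mapsFrom m es := by
  induction es with
  | nil => intro ms m; simp [mapsFrom]
  | cons e es ih =>
    intro ms m
    simp only [List.foldl_cons, List.getLastD_concat]
    have := ih (ms ++ [m]) (pvCompose m e)
    simp only [List.append_assoc] at this ⊢
    simpa [mapsFrom] using this

-- A's loop produces history ++ histFrom
theorem runLoopA_eq (events : List Int) (state : Int) (history : List Int) (idx : Nat) :
    runLoopA events state history idx = history ++ histFrom state (events.drop idx) := by
  induction state, history, idx using runLoopA.induct events with
  | case1 state history idx h s ih =>
    rw [runLoopA]
    simp only [h, dite_true]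
    rw [ih, List.drop_eq_getElem_cons h]
    simp [histFrom, s]
  | case2 state history idx h =>
    rw [runLoopA]
    simp only [h, dite_false]
    rw [List.drop_of_length_le (by omega)]
    simp [histFrom]

-- ===== VERDICT =====
theorem run_protocol_spec : Claim_equal_run_protocol := by
  intro events _
  unfold Spec_run_protocol run_protocol run_protocol_alt
  rw [runLoopA_eq]
  have hfold := foldlB_eq events [] pvIdent
  simp only [List.nil_append] at hfold
  rw [hfold]
  have hgood : GoodMap pvIdent := by constructor <;> decide
  have := mapsFrom_eval events 0 [1, 2, 3, 4, 5, 6, 7, 8, 9] (by simpa [pvIdent] using hgood)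
  simp only [List.map_cons, List.map_append, pvIdent] at this ⊢
  simp [this]
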